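-- pv_equiv track=rewrite | github.com/SohamChhajed/SimpleRagApp | optimize_gepa.py | extract_token_summary
-- ===== SOURCE A (Python) =====
-- def extract_token_summary(lm_usage):
--     if not lm_usage:
--         return {
--             "prompt_tokens": "0",
--             "completion_tokens": "0",
--             "total_tokens": "0",
--         }
--
--     prompt = completion = total = 0
--     for _, stats in lm_usage.items():
--         prompt += stats.get("prompt_tokens", 0)
--         completion += stats.get("completion_tokens", 0)
--         total += stats.get("total_tokens", 0)
--
--     return {
--         "prompt_tokens": str(prompt),
--         "completion_tokens": str(completion),
--         "total_tokens": str(total),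
--     }
-- ===== SOURCE B (Python) =====
-- def extract_token_summary(lm_usage):
--     if not lm_usage:
--         return {
--             "prompt_tokens": "0",
--             "completion_tokens": "0",
--             "total_tokens": "0",
--         }
--     return {
--         key: str(sum(stats.get(key, 0) for stats in lm_usage.values()))
--         for key in ("prompt_tokens", "completion_tokens", "total_tokens")
--     }
-- ===== Notes on version B (the rewrite author's own statement) =====
-- stated objective: idiomatic
-- what changed: Replaces the single fused loop with a triple accumulator by a dict comprehension over the three keys, each value an independent sum(...) pass over the usage values (three scans instead of one).
import Mathlib
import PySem

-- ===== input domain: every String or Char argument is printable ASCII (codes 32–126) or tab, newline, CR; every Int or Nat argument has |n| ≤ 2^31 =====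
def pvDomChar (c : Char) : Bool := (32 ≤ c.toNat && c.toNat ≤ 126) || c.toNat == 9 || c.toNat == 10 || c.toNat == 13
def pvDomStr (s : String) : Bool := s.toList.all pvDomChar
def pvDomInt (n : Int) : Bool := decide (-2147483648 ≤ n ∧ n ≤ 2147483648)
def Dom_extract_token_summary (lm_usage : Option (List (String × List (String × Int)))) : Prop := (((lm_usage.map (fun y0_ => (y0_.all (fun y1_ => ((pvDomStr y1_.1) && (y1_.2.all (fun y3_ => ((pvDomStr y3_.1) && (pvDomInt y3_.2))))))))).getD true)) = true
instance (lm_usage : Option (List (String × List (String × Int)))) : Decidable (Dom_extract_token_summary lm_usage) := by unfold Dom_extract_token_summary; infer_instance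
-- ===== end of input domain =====

-- B replaces A's single fused loop (triple accumulator) by three independent sum passes, one per key.

-- ===== PORT A =====
-- stats.get(key, 0) on an association-list dict = first-match lookup with default
def extract_token_summary (lm_usage : Option (List (String × List (String × Int)))) : List (String × String) :=
  match lm_usage with
  | none =>
      [("prompt_tokens", "0"), ("completion_tokens", "0"), ("total_tokens", "0")]
  | some d =>
      if d = [] then
        [("prompt_tokens", "0"), ("completion_tokens", "0"), ("total_tokens", "0")]
      else
        let acc := d.foldl (fun (acc : Int × Int × Int) kv =>
          (acc.1 + ((kv.2.lookup "prompt_tokens").getD 0),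
           acc.2.1 + ((kv.2.lookup "completion_tokens").getD 0),
           acc.2.2 + ((kv.2.lookup "total_tokens").getD 0))) (0, 0, 0)
        [("prompt_tokens", PySem.Int.toStr acc.1),
         ("completion_tokens", PySem.Int.toStr acc.2.1),
         ("total_tokens", PySem.Int.toStr acc.2.2)]

-- ===== PORT B =====
-- sum(stats.get(key, 0) for stats in lm_usage.values())
def pvSumKey (vals : List (List (String × Int))) (key : String) : Int :=
  (vals.map (fun stats => ((stats.lookup key).getD 0))).sum

def extract_token_summary_alt (lm_usage : Option (List (String × List (String × Int)))) : List (String × String) :=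
  match lm_usage with
  | none =>
      [("prompt_tokens", "0"), ("completion_tokens", "0"), ("total_tokens", "0")]
  | some d =>
      if d = [] then
        [("prompt_tokens", "0"), ("completion_tokens", "0"), ("total_tokens", "0")]
      else
        ["prompt_tokens", "completion_tokens", "total_tokens"].map
          (fun key => (key, PySem.Int.toStr (pvSumKey (d.map Prod.snd) key)))

-- ===== PRECONDITION & SPEC =====
def Spec_extract_token_summary (lm_usage : Option (List (String × List (String × Int)))) (out : List (String × String)) : Prop := out = extract_token_summary_alt lm_usage
instance (lm_usage : Option (List (String × List (String × Int)))) (out : List (String × String)) : Decidable (Spec_extract_token_summary lm_usage out) := by unfold Spec_extract_token_summary; infer_instance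

-- ===== CLAIM (what is proved, stated in full; the proofs are below) =====
def Claim_equal_extract_token_summary : Prop := ∀ (lm_usage : Option (List (String × List (String × Int)))), Dom_extract_token_summary lm_usage → Spec_extract_token_summary lm_usage (extract_token_summary lm_usage)

-- ===== LEMMAS AND PROOFS =====

theorem pv_foldl_triple (d : List (String × List (String × Int))) (p c t : Int) :
    d.foldl (fun (acc : Int × Int × Int) kv =>
      (acc.1 + ((kv.2.lookup "prompt_tokens").getD 0),
       acc.2.1 + ((kv.2.lookup "completion_tokens").getD 0),
       acc.2.2 + ((kv.2.lookup "total_tokens").getD 0))) (p, c, t)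
    = (p + pvSumKey (d.map Prod.snd) "prompt_tokens",
       c + pvSumKey (d.map Prod.snd) "completion_tokens",
       t + pvSumKey (d.map Prod.snd) "total_tokens") := by
  induction d generalizing p c t with
  | nil => simp [pvSumKey]
  | cons kv rest ih =>
      simp only [List.foldl_cons, ih, pvSumKey, List.map_cons, List.sum_cons]
      refine Prod.ext ?_ (Prod.ext ?_ ?_) <;> simp <;> ring

theorem extract_token_summary_eq (lm_usage : Option (List (String × List (String × Int)))) :
    extract_token_summary lm_usage = extract_token_summary_alt lm_usage := by
  cases lm_usage with
  | none => rfl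
  | some d =>
      by_cases h : d = []
      · simp [extract_token_summary, extract_token_summary_alt, h]
      · simp [extract_token_summary, extract_token_summary_alt, h, pv_foldl_triple, List.map]

-- ===== VERDICT (by name: the statement is the Claim_ definition above) =====
theorem extract_token_summary_spec : Claim_equal_extract_token_summary := by
  intro lm_usage _
  unfold Spec_extract_token_summary
  exact extract_token_summary_eq lm_usage
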